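-- pv_equiv track=rewrite | github.com/patricksnotstar/Data_Mining_class | Assignment3/301356154.py | maximalItemSets
-- ===== SOURCE A (Python) =====
-- def maximalItemSets(itemsets):
--     ret = {}
--     allLens = set(itemsets.keys())
--     while len(allLens) > 0:
--         maxLen = max(allLens)
--         allLens.remove(maxLen)
--         ret[maxLen] = {}
--         for toop in itemsets[maxLen].keys():
--             ret[maxLen][toop] = itemsets[maxLen][toop]
--             for length in allLens:
--                 for toople in list(itemsets[length].keys()):
--                     if all(v in toop for v in toople):
--                         del itemsets[length][toople]
--     for k in list(ret.keys()):
--         if len(ret[k]) == 0: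
--             del ret[k]
--     return ret
-- ===== SOURCE B (Python) =====
-- def maximalItemSets(itemsets):
--     # Single functional pass over buckets sorted by key descending:
--     # an itemset survives iff it is not a subset of any itemset living
--     # in a bucket with a strictly larger key.
--     out = {}
--     bigger = []  # frozensets of all itemsets seen in larger-key buckets
--     for k, bucket in sorted(itemsets.items(), key=lambda kv: kv[0], reverse=True):
--         kept = {t: c for t, c in bucket.items()
--                 if not any(set(t) <= s for s in bigger)}
--         if kept:
--             out[k] = kept
--         bigger += [frozenset(t) for t in bucket]
--     return out
-- ===== Notes on version B (the rewrite author's own statement) =====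
-- stated objective: faster
-- what changed: Replaces A's in-place destructive pruning (repeated max-extraction from a key set, with triple-nested deletion loops mutating the input dict) by one functional pass over the buckets sorted by key descending, testing each itemset once against the frozensets of all itemsets already seen in larger buckets; comparing against all (not just surviving) larger itemsets is correct by transitivity of set inclusion, and frozenset containment replaces the per-element membership scans.
import Mathlib
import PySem

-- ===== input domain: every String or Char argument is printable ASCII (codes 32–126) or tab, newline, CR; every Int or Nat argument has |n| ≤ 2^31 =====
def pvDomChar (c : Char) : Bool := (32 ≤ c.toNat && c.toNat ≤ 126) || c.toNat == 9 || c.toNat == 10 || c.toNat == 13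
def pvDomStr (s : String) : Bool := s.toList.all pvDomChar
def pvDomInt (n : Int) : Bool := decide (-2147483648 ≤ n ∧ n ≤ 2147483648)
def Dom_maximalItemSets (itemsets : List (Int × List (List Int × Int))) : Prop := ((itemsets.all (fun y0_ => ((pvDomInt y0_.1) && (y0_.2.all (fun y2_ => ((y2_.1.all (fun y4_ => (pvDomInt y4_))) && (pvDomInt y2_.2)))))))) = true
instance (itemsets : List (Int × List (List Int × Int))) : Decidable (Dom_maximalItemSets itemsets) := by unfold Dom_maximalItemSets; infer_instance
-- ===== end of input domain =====

-- B keeps only maximal itemsets by one functional pass over buckets sorted by key descending,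
-- instead of A's destructive triple-nested deletion loops; A mutates its argument dict in place
-- (entries are deleted from the inner dicts) — the equivalence proved here is about the RETURN value.


abbrev pvBkt : Type := PySem.Dict (List Int) Int
abbrev pvDD : Type := PySem.Dict Int pvBkt

-- all(v in toop for v in toople)
def pvSub (toople toop : List Int) : Bool := toople.all (fun v => toop.contains v)

-- 'for toople in list(itemsets[length].keys()): if all(...): del itemsets[length][toople]'
def pvPruneB (b : pvBkt) (toop : List Int) : pvBkt :=
  b.keys.foldl (fun b' toople => if pvSub toople toop then b'.erase toople else b') b

-- 'for length in allLens: ...' (bucket-wise, order-independent)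
def pvPrune (its : pvDD) (lens : List Int) (toop : List Int) : pvDD :=
  lens.foldl (fun its2 len => its2.insert len (pvPruneB (its2.getD len PySem.Dict.empty) toop)) its

-- the while-loop of A; max(allLens) is some iff the loop guard len(allLens) > 0 holds
def pvLoopA (allLens : PySem.Set Int) (its ret : pvDD) : pvDD :=
  match hm : PySem.List.max? allLens (fun x => x) with
  | none => ret
  | some maxLen =>
    let allLens' : PySem.Set Int := (PySem.Set.remove? allLens maxLen).getD []
    let st := ((its.getD maxLen PySem.Dict.empty).keys).foldl
      (fun (st : pvDD × pvBkt) toop =>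
        (pvPrune st.1 allLens' toop,
         st.2.insert toop ((st.1.getD maxLen PySem.Dict.empty).getD toop 0)))
      (its, PySem.Dict.empty)
    pvLoopA allLens' st.1 (ret.insert maxLen st.2)
termination_by allLens.length
decreasing_by
  have hmem : maxLen ∈ allLens := PySem.List.max?_mem hm
  have hc : allLens.contains maxLen = true := by
    simpa using hmem
  simp only [PySem.Set.remove?, hc, if_true, Option.getD_some, PySem.Set.discard]
  exact List.length_filter_lt_length_iff_exists.mpr ⟨maxLen, hmem, by simp⟩

def maximalItemSets (itemsets : List (Int × List (List Int × Int))) : List (Int × List (List Int × Int)) :=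
  let its : pvDD := PySem.Dict.ofList (itemsets.map (fun kv => (kv.1, PySem.Dict.ofList kv.2)))
  let allLens : PySem.Set Int := PySem.Set.ofList its.keys
  let ret := pvLoopA allLens its PySem.Dict.empty
  -- 'for k in list(ret.keys()): if len(ret[k]) == 0: del ret[k]'
  let ret2 := ret.keys.foldl
    (fun r k => if (r.getD k PySem.Dict.empty).size == 0 then r.erase k else r) ret
  ret2.items.map (fun kv => (kv.1, kv.2.items))

-- ===== PORT B =====
-- any(set(t) <= s for s in bigger)
def pvSubsetAny (t : List Int) (bigger : List (PySem.Set Int)) : Bool :=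
  bigger.any (fun s => PySem.Set.issubset (PySem.Set.ofList t) s)

def maximalItemSets_alt (itemsets : List (Int × List (List Int × Int))) : List (Int × List (List Int × Int)) :=
  let d : pvDD := PySem.Dict.ofList (itemsets.map (fun kv => (kv.1, PySem.Dict.ofList kv.2)))
  let st := (PySem.List.sorted d.items (fun kv => kv.1) true).foldl
    (fun (st : pvDD × List (PySem.Set Int)) kb =>
      let kept : pvBkt := PySem.Dict.ofList (kb.2.items.filter (fun tc => ! pvSubsetAny tc.1 st.2))
      ((if kept.size == 0 then st.1 else st.1.insert kb.1 kept),
       st.2 ++ kb.2.keys.map (fun t => PySem.Set.ofList t)))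
    (PySem.Dict.empty, [])
  st.1.items.map (fun kv => (kv.1, kv.2.items))

-- ===== PRECONDITION & SPEC =====
def Spec_maximalItemSets (itemsets : List (Int × List (List Int × Int))) (out : List (Int × List (List Int × Int))) : Prop := out = maximalItemSets_alt itemsets
instance (itemsets : List (Int × List (List Int × Int))) (out : List (Int × List (List Int × Int))) : Decidable (Spec_maximalItemSets itemsets out) := by unfold Spec_maximalItemSets; infer_instance

-- ===== CLAIM (what is proved, stated in full; the proofs are below) =====
def Claim_equal_maximalItemSets : Prop := ∀ (itemsets : List (Int × List (List Int × Int))), Dom_maximalItemSets itemsets → Spec_maximalItemSets itemsets (maximalItemSets itemsets)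

-- ===== LEMMAS AND PROOFS =====

-- 'does some u in T contain all of t?'
def pvAny (t : List Int) (T : List (List Int)) : Bool := T.any (fun u => pvSub t u)

-- bucket ob with every itemset contained in some member of T removed
def pvFilt (ob : pvBkt) (T : List (List Int)) : pvBkt :=
  PySem.Dict.mk (ob.items.filter (fun p => ! pvAny p.1 T))

-- A's semantics: prune by SURVIVING itemsets of larger buckets
def pvSpec : List (Int × pvBkt) → List (List Int) → List (Int × pvBkt)
  | [], _ => []
  | kb :: rest, T => (kb.1, pvFilt kb.2 T) :: pvSpec rest (T ++ (pvFilt kb.2 T).keys)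

-- B's semantics: prune by ALL itemsets of larger buckets
def pvSpecAll : List (Int × pvBkt) → List (List Int) → List (Int × pvBkt)
  | [], _ => []
  | kb :: rest, T => (kb.1, pvFilt kb.2 T) :: pvSpecAll rest (T ++ kb.2.keys)

-- A's while-loop as a pure recursion over the descending bucket list
def pvSpecRun : List (Int × pvBkt) → List (List Int) → pvDD → pvDD
  | [], _, ret => ret
  | kb :: rest, T, ret =>
      pvSpecRun rest (T ++ (pvFilt kb.2 T).keys) (ret.insert kb.1 (pvFilt kb.2 T))

lemma pvSub_trans {a b c : List Int} (h1 : pvSub a b = true) (h2 : pvSub b c = true) :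
    pvSub a c = true := by
  simp only [pvSub, List.all_eq_true, List.contains_iff_mem] at *
  exact fun v hv => h2 v (h1 v hv)

lemma pv_find?_filter {α : Type} (l : List α) (p q : α → Bool) :
    (l.filter p).find? q = (l.find? fun a => p a && q a) := by
  induction l with
  | nil => rfl
  | cons a t ih =>
    by_cases hp : p a <;> by_cases hq : q a <;> simp [hp, hq, ih]

lemma pv_get?_erase_ne {κ ν : Type} [BEq κ] [LawfulBEq κ] (d : PySem.Dict κ ν) (k k' : κ)
    (h : k' ≠ k) : (d.erase k).get? k' = d.get? k' := by
  simp only [PySem.Dict.erase, PySem.Dict.get?, pv_find?_filter]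
  have hfun : (fun (a : κ × ν) => !(a.1 == k) && (a.1 == k')) = (fun a => a.1 == k') := by
    funext a
    by_cases ha : a.1 = k' <;> simp [ha, h]
  rw [hfun]

lemma pv_foldl_erase {κ ν : Type} [BEq κ] [LawfulBEq κ] (l : List κ) (p : κ → Bool)
    (d : PySem.Dict κ ν) :
    l.foldl (fun d' k => if p k then d'.erase k else d') d
      = PySem.Dict.mk (d.items.filter (fun q => !(p q.1 && l.contains q.1))) := by
  induction l generalizing d with
  | nil => simp
  | cons k rest ih =>
    rw [List.foldl_cons]
    by_cases hp : p k
    · rw [if_pos hp, ih]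
      simp only [PySem.Dict.erase, List.filter_filter]
      congr 1
      apply List.filter_congr
      intro a _
      by_cases h2 : a.1 = k
      · subst h2; simp [hp]
      · simp [h2]
    · rw [if_neg hp, ih]
      congr 1
      apply List.filter_congr
      intro a _
      by_cases h2 : a.1 = k
      · subst h2; simp [hp]
      · simp [h2]
lemma pvPruneB_filter (b : pvBkt) (toop : List Int) :
    pvPruneB b toop = PySem.Dict.mk (b.items.filter (fun q => ! pvSub q.1 toop)) := by
  rw [pvPruneB, pv_foldl_erase]
  congr 1
  apply List.filter_congr
  intro a ha
  have : a.1 ∈ b.keys := List.mem_map.mpr ⟨a, ha, rfl⟩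
  simp [List.contains_iff_mem, this]
lemma pv_foldl_pruneB (tp : List (List Int)) (b : pvBkt) :
    tp.foldl pvPruneB b = PySem.Dict.mk (b.items.filter (fun q => ! pvAny q.1 tp)) := by
  induction tp generalizing b with
  | nil => simp [pvAny]
  | cons toop tp ih =>
    rw [List.foldl_cons, ih, pvPruneB_filter]
    simp only [List.filter_filter]
    congr 1
    apply List.filter_congr
    intro a _
    simp [pvAny, Bool.and_comm]
lemma pvFilt_append (ob : pvBkt) (T tp : List (List Int)) :
    PySem.Dict.mk ((pvFilt ob T).items.filter (fun q => ! pvAny q.1 tp)) = pvFilt ob (T ++ tp) := by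
  simp only [pvFilt, List.filter_filter]
  congr 1
  apply List.filter_congr
  intro a _
  simp [pvAny, Bool.and_comm]
lemma pvFilt_nil (ob : pvBkt) : pvFilt ob [] = ob := by
  simp [pvFilt, pvAny]
lemma pv_contains_of_keys_eq {κ ν ν' : Type} [BEq κ] [LawfulBEq κ] [DecidableEq κ]
    (d : PySem.Dict κ ν) (d' : PySem.Dict κ ν')
    (h : d.keys = d'.keys) (k : κ) : d.contains k = d'.contains k := by
  rw [PySem.Dict.contains_eq_decide_mem_keys, PySem.Dict.contains_eq_decide_mem_keys, h]

lemma pvPrune_spec (lens : List Int) : ∀ (its : pvDD) (toop : List Int),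
    lens.Nodup → (∀ l ∈ lens, its.contains l = true) →
    (pvPrune its lens toop).keys = its.keys ∧
    (∀ k, (pvPrune its lens toop).get? k =
      if lens.contains k then (its.get? k).map (fun b => pvPruneB b toop) else its.get? k) := by
  induction lens with
  | nil =>
    intro its toop _ _
    exact ⟨rfl, by intro k; simp [pvPrune]⟩
  | cons len rest ih =>
    intro its toop hnd hc
    have hlen : its.contains len = true := hc len (List.mem_cons_self)
    obtain ⟨b, hb⟩ : ∃ b, its.get? len = some b := by
      have := PySem.Dict.contains_eq_isSome_get? (d := its) (k := len)
      rw [hlen] at this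
      exact Option.isSome_iff_exists.mp this.symm
    have hgd : its.getD len PySem.Dict.empty = b := PySem.Dict.getD_of_get?_eq_some its PySem.Dict.empty hb
    have hstep : pvPrune its (len :: rest) toop
        = pvPrune (its.insert len (pvPruneB b toop)) rest toop := by
      simp [pvPrune, hgd]
    have hkeys1 : (its.insert len (pvPruneB b toop)).keys = its.keys :=
      PySem.Dict.keys_insert_of_contains its _ hlen
    have hcontains1 : ∀ x, (its.insert len (pvPruneB b toop)).contains x = its.contains x :=
      fun x => pv_contains_of_keys_eq _ its hkeys1 x
    have hnd' : rest.Nodup := hnd.of_cons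
    have hlenrest : len ∉ rest := (List.nodup_cons.mp hnd).1
    obtain ⟨ihk, ihg⟩ := ih (its.insert len (pvPruneB b toop)) toop hnd'
      (fun l hl => (hcontains1 l).trans (hc l (List.mem_cons_of_mem _ hl)))
    refine ⟨by rw [hstep, ihk, hkeys1], ?_⟩
    intro k
    rw [hstep, ihg k]
    by_cases hk : rest.contains k
    · have hkne : k ≠ len := by
        intro h; subst h
        exact hlenrest (List.contains_iff_mem.mp hk)
      rw [if_pos hk, PySem.Dict.get?_insert, if_neg hkne,
        if_pos (by
          simp only [List.contains_iff_mem] at hk ⊢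
          exact List.mem_cons_of_mem _ hk)]
    · rw [if_neg hk, PySem.Dict.get?_insert]
      by_cases hkl : k = len
      · subst hkl
        rw [if_pos rfl, if_pos (by simp [List.contains_iff_mem]), hb]
        rfl
      · rw [if_neg hkl, if_neg (by
          simp only [List.contains_iff_mem, List.mem_cons] at hk ⊢
          exact fun h => h.elim hkl fun h' => hk h')]
lemma pv_toopfold (tp : List (List Int)) (lens : List Int) (m : Int) (bucket : pvBkt) :
    ∀ (its : pvDD) (rb : pvBkt),
    lens.Nodup → lens.contains m = false → (∀ l ∈ lens, its.contains l = true) →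
    its.get? m = some bucket →
    (let st := tp.foldl (fun (st : pvDD × pvBkt) toop =>
        (pvPrune st.1 lens toop,
         st.2.insert toop ((st.1.getD m PySem.Dict.empty).getD toop 0))) (its, rb)
     st.1.keys = its.keys ∧ st.1.get? m = some bucket ∧
     (∀ k, st.1.get? k =
        if lens.contains k then (its.get? k).map (fun b => tp.foldl pvPruneB b) else its.get? k) ∧
     st.2 = tp.foldl (fun rb t => rb.insert t (bucket.getD t 0)) rb) := by
  induction tp with
  | nil =>
    intro its rb _ _ _ hm
    refine ⟨rfl, hm, ?_, rfl⟩
    intro k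
    by_cases hk : lens.contains k <;> simp [hk]
  | cons toop tp ih =>
    intro its rb hnd hmlens hc hm
    simp only [List.foldl_cons]
    obtain ⟨hkeys1, hget1⟩ := pvPrune_spec lens its toop hnd hc
    have hits1m : (pvPrune its lens toop).get? m = some bucket := by
      rw [hget1 m, if_neg (by rw [hmlens]; simp), hm]
    have hrb : its.getD m PySem.Dict.empty = bucket :=
      PySem.Dict.getD_of_get?_eq_some its PySem.Dict.empty hm
    have hc1 : ∀ l ∈ lens, (pvPrune its lens toop).contains l = true :=
      fun l hl => (pv_contains_of_keys_eq _ its hkeys1 l).trans (hc l hl)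
    obtain ⟨ik, im, ig, irb⟩ := ih (pvPrune its lens toop)
      (rb.insert toop ((its.getD m PySem.Dict.empty).getD toop 0)) hnd hmlens hc1 hits1m
    refine ⟨ik.trans hkeys1, im, ?_, ?_⟩
    · intro k
      rw [ig k, hget1 k]
      by_cases hk : lens.contains k
      · rw [if_pos hk, if_pos hk, Option.map_map, if_pos hk]
        rfl
      · rw [if_neg hk, if_neg hk, if_neg hk]
    · rw [irb, hrb]
lemma pv_pair_strict (L : List Int) (h1 : L.Pairwise (fun a b => b ≤ a)) (h2 : L.Nodup) :
    L.Pairwise (fun a b => b < a) := by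
  have := List.Pairwise.and h1 h2
  exact this.imp (fun h => lt_of_le_of_ne h.1 (Ne.symm h.2))
lemma pv_max_some {s : List Int} {m : Int} (hm : m ∈ s) (hmax : ∀ y ∈ s, y ≤ m) :
    PySem.List.max? s (fun x => x) = some m := by
  obtain ⟨m', hm'⟩ : ∃ m', PySem.List.max? s (fun x => x) = some m' := by
    cases h : PySem.List.max? s (fun x => x) with
    | none =>
      rw [PySem.List.max?_eq_none_iff] at h
      subst h; cases hm
    | some m' => exact ⟨m', rfl⟩
  have h1 : m' ∈ s := PySem.List.max?_mem hm'
  have h2 : m ≤ m' := PySem.List.max?_isMax hm' m hm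
  have h3 : m' ≤ m := hmax m' h1
  rw [hm', le_antisymm h3 h2]
lemma pv_sorted_keys (d : pvDD) (h : d.keys.Nodup) :
    PySem.List.sorted d.keys (fun x => x) true
      = (PySem.List.sorted d.items (fun kv => kv.1) true).map (fun kv => kv.1) := by
  apply PySem.List.sorted_rev_eq_of_perm_of_pairwise_gt
  · exact ((PySem.List.sorted_perm d.items (fun kv => kv.1) true).map (fun kv => kv.1))
  · apply pv_pair_strict
    · have := PySem.List.sorted_pairwise_rev d.items (fun kv => kv.1)
      exact List.pairwise_map.mpr this
    · refine List.Perm.nodup ?_ h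
      exact ((PySem.List.sorted_perm d.items (fun kv => kv.1) true).map (fun kv => kv.1)).symm
lemma pv_ofList_eq_mk {κ ν : Type} [BEq κ] [LawfulBEq κ] (l : List (κ × ν))
    (h : (l.map Prod.fst).Nodup) : PySem.Dict.ofList l = PySem.Dict.mk l := by
  apply PySem.Dict.ext
  have := PySem.Dict.items_foldl_insert_fresh l Prod.fst Prod.snd PySem.Dict.empty
    (fun a _ => by simp [PySem.Dict.contains_empty]) h
  simp only [PySem.Dict.ofList, PySem.Dict.update]
  simpa using this
lemma pv_update_pred {κ ν : Type} [BEq κ] [LawfulBEq κ] (P : κ × ν → Prop) (l : List (κ × ν)) :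
    ∀ (d : PySem.Dict κ ν), (∀ q ∈ d.items, P q) → (∀ q ∈ l, P q) →
    ∀ q ∈ (d.update l).items, P q := by
  induction l with
  | nil => intro d hd _; exact hd
  | cons a l ih =>
    intro d hd hl
    simp only [PySem.Dict.update, List.foldl_cons]
    refine ih (d.insert a.1 a.2) ?_ (fun q hq => hl q (List.mem_cons_of_mem _ hq))
    intro q hq
    rcases (PySem.Dict.mem_items_insert d a.1 a.2 q).mp hq with h | h
    · subst h; exact hl a List.mem_cons_self
    · exact hd q h.1
lemma pvLoopA_spec : ∀ (kbs : List (Int × pvBkt)) (s : PySem.Set Int) (its ret : pvDD)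
    (T : List (List Int)),
    s.Nodup →
    PySem.List.sorted s (fun x => x) true = kbs.map (fun kv => kv.1) →
    (∀ k ∈ s, its.contains k = true) →
    (∀ kb ∈ kbs, its.get? kb.1 = some (pvFilt kb.2 T)) →
    (∀ kb ∈ kbs, kb.2.keys.Nodup) →
    pvLoopA s its ret = pvSpecRun kbs T ret := by
  intro kbs
  induction kbs with
  | nil =>
    intro s its ret T _ hsort _ _ _
    have hs : s = [] := by
      have := PySem.List.sorted_eq_nil_iff (xs := s) (key := fun x : Int => x) (rev := true)
      simp only [List.map_nil] at hsort
      exact this.mp hsort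
    subst hs
    rw [pvLoopA]
    rfl
  | cons kb rest ih =>
    intro s its ret T hnd hsort hcont hfilt hknd
    have hmem : kb.1 ∈ s := by
      have : kb.1 ∈ PySem.List.sorted s (fun x => x) true := by
        rw [hsort]; exact List.mem_cons_self
      exact (PySem.List.sorted_perm s (fun x => x) true).subset this
    have hs' : PySem.List.sorted s (fun x => x) true
        = kb.1 :: rest.map (fun kv => kv.1) := by
      rw [hsort, List.map_cons]
    have hmax : ∀ y ∈ s, y ≤ kb.1 :=
      PySem.List.key_head_sorted_rev_ge s (fun x => x) hs' 

    have hmaxeq : PySem.List.max? s (fun x => x) = some kb.1 := pv_max_some hmem hmax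
    have hconskeys : (kb.1 :: rest.map (fun kv => kv.1)).Nodup := by
      rw [← hs']
      exact ((PySem.List.sorted_perm s (fun x => x) true).nodup_iff).mpr hnd
    have hheadnot : kb.1 ∉ rest.map (fun kv => kv.1) := (List.nodup_cons.mp hconskeys).1
    have hcontains : s.contains kb.1 = true := by
      simp [List.contains_iff_mem, hmem]
    have hlens : (PySem.Set.remove? s kb.1).getD [] = PySem.Set.discard s kb.1 := by
      simp [PySem.Set.remove?, hcontains, hmem]
    -- the remaining keys
    have hLperm : (rest.map (fun kv => kv.1)).Perm (PySem.Set.discard s kb.1) := by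
      have hp1 : (kb.1 :: rest.map (fun kv => kv.1)).Perm s := by
        rw [← hs']
        exact PySem.List.sorted_perm s (fun x => x) true
      have hp2 := hp1.filter (fun y => !(y == kb.1))
      have hL1 : (kb.1 :: rest.map (fun kv => kv.1)).filter (fun y => !(y == kb.1))
          = rest.map (fun kv => kv.1) := by
        rw [List.filter_cons, if_neg (by simp)]
        apply List.filter_eq_self.mpr
        intro a ha
        simp only [Bool.not_eq_true']
        exact beq_false_of_ne (fun he => hheadnot (he ▸ ha))
      rw [hL1] at hp2
      exact hp2
    have hsort' : PySem.List.sorted (PySem.Set.discard s kb.1) (fun x => x) true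
        = rest.map (fun kv => kv.1) := by
      apply PySem.List.sorted_rev_eq_of_perm_of_pairwise_gt
      · exact hLperm
      · apply pv_pair_strict
        · have := PySem.List.sorted_pairwise_rev s (fun x : Int => x)
          rw [hsort] at this
          exact (List.pairwise_cons.mp this).2
        · exact (List.nodup_cons.mp hconskeys).2
    have hnd' : (PySem.Set.discard s kb.1).Nodup := hLperm.nodup_iff.mp ((List.nodup_cons.mp hconskeys).2)
    have hmnot : (PySem.Set.discard s kb.1).contains kb.1 = false := by
      have : kb.1 ∉ PySem.Set.discard s kb.1 := by
        intro h
        exact ((PySem.Set.mem_discard s kb.1 kb.1).mp h).2 rfl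
      simp [List.contains_iff_mem, this]
    have hsubs : ∀ l ∈ PySem.Set.discard s kb.1, l ∈ s :=
      fun l hl => ((PySem.Set.mem_discard s kb.1 l).mp hl).1
    -- the current bucket
    have hbget : its.get? kb.1 = some (pvFilt kb.2 T) := hfilt kb List.mem_cons_self
    have hbgd : its.getD kb.1 PySem.Dict.empty = pvFilt kb.2 T :=
      PySem.Dict.getD_of_get?_eq_some its PySem.Dict.empty hbget
    have hBnd : (pvFilt kb.2 T).keys.Nodup := by
      have : (pvFilt kb.2 T).keys.Sublist kb.2.keys :=
        List.Sublist.map _ List.filter_sublist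
      exact this.nodup (hknd kb List.mem_cons_self)
    -- unfold one iteration of the while loop
    rw [pvLoopA]
    split
    case _ heq => rw [hmaxeq] at heq; cases heq
    case _ maxLen heq =>
      rw [hmaxeq] at heq
      injection heq with heq'
      subst heq'
      rw [hlens, hbgd]
      dsimp only
      obtain ⟨hst1keys, hst1m, hst1get, hst2⟩ := pv_toopfold (pvFilt kb.2 T).keys
        (PySem.Set.discard s kb.1) kb.1 (pvFilt kb.2 T) its PySem.Dict.empty
        hnd' hmnot (fun l hl => hcont l (hsubs l hl)) hbget
      set st := ((pvFilt kb.2 T).keys).foldl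
        (fun (st : pvDD × pvBkt) toop =>
          (pvPrune st.1 (PySem.Set.discard s kb.1) toop,
           st.2.insert toop ((st.1.getD kb.1 PySem.Dict.empty).getD toop 0)))
        (its, PySem.Dict.empty) with hstdef
      -- the rebuilt bucket equals the surviving bucket
      have hst2B : st.2 = pvFilt kb.2 T := by
        rw [hst2]
        apply PySem.Dict.ext
        rw [PySem.Dict.items_foldl_insert_fresh (pvFilt kb.2 T).keys (fun t => t)
          (fun t => (pvFilt kb.2 T).getD t 0) PySem.Dict.empty
          (fun a _ => PySem.Dict.contains_empty a) (by simpa using hBnd)]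
        have := PySem.Dict.items_eq_map_keys (pvFilt kb.2 T) hBnd 0
        simp only [PySem.Dict.items] at this ⊢
        rw [← this]
        rfl
      rw [hst2B]
      -- recurse
      have happly := ih (PySem.Set.discard s kb.1) st.1 (ret.insert kb.1 (pvFilt kb.2 T))
        (T ++ (pvFilt kb.2 T).keys) hnd' hsort' ?hc ?hf ?hknd'
      · rw [happly, pvSpecRun]
      case hc =>
        intro k hk
        rw [pv_contains_of_keys_eq st.1 its hst1keys k]
        exact hcont k (hsubs k hk)
      case hf =>
        intro kb' hkb'
        have hkmem : kb'.1 ∈ PySem.Set.discard s kb.1 :=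
          hLperm.subset (List.mem_map.mpr ⟨kb', hkb', rfl⟩)
        have hkc : List.contains (PySem.Set.discard s kb.1) kb'.1 = true := by
          simp [List.contains_iff_mem, hkmem]
        rw [hst1get kb'.1, if_pos hkc, hfilt kb' (List.mem_cons_of_mem _ hkb'), Option.map_some,
          pv_foldl_pruneB, pvFilt_append]
      case hknd' =>
        exact fun kb' h => hknd kb' (List.mem_cons_of_mem _ h)

lemma pvSpec_map_fst : ∀ (kbs : List (Int × pvBkt)) (T : List (List Int)),
    (pvSpec kbs T).map (fun kv => kv.1) = kbs.map (fun kv => kv.1) := by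
  intro kbs
  induction kbs with
  | nil => intro T; rfl
  | cons kb rest ih => intro T; simp [pvSpec, ih]
lemma pvSpecRun_items : ∀ (kbs : List (Int × pvBkt)) (T : List (List Int)) (ret : pvDD),
    (∀ kb ∈ kbs, ret.contains kb.1 = false) → (kbs.map (fun kv => kv.1)).Nodup →
    pvSpecRun kbs T ret = PySem.Dict.mk (ret.items ++ pvSpec kbs T) := by
  intro kbs
  induction kbs with
  | nil => intro T ret _ _; simp [pvSpecRun, pvSpec]
  | cons kb rest ih =>
    intro T ret hfresh hnd
    rw [pvSpecRun, ih _ _ ?hf ?hn, pvSpec]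
    · rw [PySem.Dict.items_insert_of_not_contains ret _ (hfresh kb List.mem_cons_self)]
      simp
    case hf =>
      intro kb' hkb'
      rw [PySem.Dict.contains_insert]
      have hne : kb'.1 ≠ kb.1 := by
        intro he
        have : kb.1 ∈ rest.map (fun kv => kv.1) := he ▸ List.mem_map.mpr ⟨kb', hkb', rfl⟩
        exact (List.nodup_cons.mp (by simpa using hnd)).1 this
      simp [hne, hfresh kb' (List.mem_cons_of_mem _ hkb')]
    case hn => exact (List.nodup_cons.mp (by simpa using hnd)).2
lemma pv_fold_dyn (l : List Int) : ∀ (d r : pvDD), l.Nodup →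
    (∀ k ∈ l, r.get? k = d.get? k) →
    l.foldl (fun r k => if (r.getD k PySem.Dict.empty).size == 0 then r.erase k else r) r
      = l.foldl (fun r k => if (d.getD k PySem.Dict.empty).size == 0 then r.erase k else r) r := by
  induction l with
  | nil => intro d r _ _; rfl
  | cons k rest ih =>
    intro d r hnd hagree
    simp only [List.foldl_cons]
    have hgd : r.getD k PySem.Dict.empty = d.getD k PySem.Dict.empty := by
      rw [PySem.Dict.getD_eq_get?_getD, PySem.Dict.getD_eq_get?_getD,
        hagree k List.mem_cons_self]
    rw [hgd]
    by_cases hz : (d.getD k PySem.Dict.empty).size == 0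
    · rw [if_pos hz]
      refine ih d (r.erase k) hnd.of_cons ?_
      intro k' hk'
      have hne : k' ≠ k := fun he => (List.nodup_cons.mp hnd).1 (he ▸ hk')
      rw [pv_get?_erase_ne r k k' hne, hagree k' (List.mem_cons_of_mem _ hk')]
    · rw [if_neg hz]
      exact ih d r hnd.of_cons (fun k' hk' => hagree k' (List.mem_cons_of_mem _ hk'))
lemma pv_erase_empty (d : pvDD) (hnd : d.keys.Nodup) :
    d.keys.foldl (fun r k => if (r.getD k PySem.Dict.empty).size == 0 then r.erase k else r) d
      = PySem.Dict.mk (d.items.filter (fun q => !(q.2.size == 0))) := by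
  rw [pv_fold_dyn d.keys d d hnd (fun _ _ => rfl),
    pv_foldl_erase d.keys (fun k => (d.getD k PySem.Dict.empty).size == 0) d]
  congr 1
  apply List.filter_congr
  intro q hq
  have h1 : d.getD q.1 PySem.Dict.empty = q.2 := PySem.Dict.getD_of_mem_items d hq hnd PySem.Dict.empty
  have h2 : q.1 ∈ d.keys := List.mem_map.mpr ⟨q, hq, rfl⟩
  simp [h1, List.contains_iff_mem, h2]
lemma pvSpec_eq_All : ∀ (kbs : List (Int × pvBkt)) (T1 T2 : List (List Int)),
    (∀ t, pvAny t T1 = pvAny t T2) → pvSpec kbs T1 = pvSpecAll kbs T2 := by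
  intro kbs
  induction kbs with
  | nil => intro T1 T2 _; rfl
  | cons kb rest ih =>
    intro T1 T2 h
    have hfilt : pvFilt kb.2 T1 = pvFilt kb.2 T2 := by
      simp only [pvFilt]
      congr 1
      apply List.filter_congr
      intro q _
      rw [h q.1]
    rw [pvSpec, pvSpecAll, hfilt]
    congr 1
    apply ih
    intro t
    apply Bool.coe_iff_coe.mp
    simp only [pvAny, List.any_append, Bool.or_eq_true, List.any_eq_true]
    have hmemT : ∀ u, (∃ w ∈ T1, pvSub u w = true) ↔ (∃ w ∈ T2, pvSub u w = true) := by
      intro u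
      rw [← List.any_eq_true, ← List.any_eq_true]
      exact Bool.coe_iff_coe.mpr (h u)
    constructor
    · rintro (⟨u, hu, hsub⟩ | ⟨u, hu, hsub⟩)
      · exact Or.inl ((hmemT t).mp ⟨u, hu, hsub⟩)
      · -- u is a surviving key of the bucket, hence an original key
        have : u ∈ kb.2.keys := by
          have hsl : (pvFilt kb.2 T2).keys.Sublist kb.2.keys := by
            simp only [pvFilt, PySem.Dict.keys]
            exact List.Sublist.map _ List.filter_sublist
          exact hsl.subset (hfilt ▸ hu)
        exact Or.inr ⟨u, this, hsub⟩
    · rintro (⟨u, hu, hsub⟩ | ⟨u, hu, hsub⟩)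
      · exact Or.inl ((hmemT t).mpr ⟨u, hu, hsub⟩)
      · -- u original key of the bucket: either it survives, or it is inside some w ∈ T1
        by_cases hau : pvAny u T1 = true
        · obtain ⟨w, hw, hsubw⟩ := List.any_eq_true.mp hau
          exact Or.inl ⟨w, hw, pvSub_trans hsub hsubw⟩
        · refine Or.inr ⟨u, ?_, hsub⟩
          obtain ⟨q, hq, hq1⟩ := List.mem_map.mp hu
          refine List.mem_map.mpr ⟨q, List.mem_filter.mpr ⟨hq, ?_⟩, hq1⟩
          simp only [Bool.not_eq_true] at hau
          simp [hq1, ← h u, hau]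
lemma pv_issubset_eq (t u : List Int) :
    PySem.Set.issubset (PySem.Set.ofList t) (PySem.Set.ofList u) = pvSub t u := by
  apply Bool.coe_iff_coe.mp
  rw [PySem.Set.issubset_iff]
  simp [pvSub, List.all_eq_true, PySem.Set.mem_ofList, List.contains_iff_mem]

lemma pvSubsetAny_map (t : List Int) (T : List (List Int)) :
    pvSubsetAny t (T.map (fun u => PySem.Set.ofList u)) = pvAny t T := by
  simp only [pvSubsetAny, pvAny, List.any_map, Function.comp]
  congr 1
  funext u
  exact pv_issubset_eq t u
lemma pvLoopB : ∀ (kbs : List (Int × pvBkt)) (T : List (List Int)) (out : pvDD),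
    (∀ kb ∈ kbs, out.contains kb.1 = false) → (kbs.map (fun kv => kv.1)).Nodup →
    (∀ kb ∈ kbs, kb.2.keys.Nodup) →
    (kbs.foldl (fun (st : pvDD × List (PySem.Set Int)) kb =>
        let kept : pvBkt := PySem.Dict.ofList (kb.2.items.filter (fun tc => ! pvSubsetAny tc.1 st.2))
        ((if kept.size == 0 then st.1 else st.1.insert kb.1 kept),
         st.2 ++ kb.2.keys.map (fun t => PySem.Set.ofList t)))
      (out, T.map (fun u => PySem.Set.ofList u))).1
      = PySem.Dict.mk (out.items ++ (pvSpecAll kbs T).filter (fun q => !(q.2.size == 0))) := by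
  intro kbs
  induction kbs with
  | nil =>
    intro T out _ _ _
    simp [pvSpecAll]
  | cons kb rest ih =>
    intro T out hfresh hnd hknd
    rw [List.foldl_cons]
    have hk2 : kb.2.keys.Nodup := hknd kb List.mem_cons_self
    have hkept : PySem.Dict.ofList (kb.2.items.filter
        (fun tc => ! pvSubsetAny tc.1 (T.map (fun u => PySem.Set.ofList u)))) = pvFilt kb.2 T := by
      have hpred : (kb.2.items.filter (fun tc => ! pvSubsetAny tc.1 (T.map (fun u => PySem.Set.ofList u))))
          = kb.2.items.filter (fun tc => ! pvAny tc.1 T) := by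
        apply List.filter_congr
        intro q _
        rw [pvSubsetAny_map]
      rw [hpred, pv_ofList_eq_mk, pvFilt]
      exact (List.Sublist.map _ List.filter_sublist).nodup hk2
    have happ : (T.map (fun u => PySem.Set.ofList u)) ++ kb.2.keys.map (fun t => PySem.Set.ofList t)
        = (T ++ kb.2.keys).map (fun u => PySem.Set.ofList u) := by
      rw [List.map_append]
    simp only [hkept, happ]
    have hnd' : (rest.map (fun kv => kv.1)).Nodup := (List.nodup_cons.mp (by simpa using hnd)).2
    have hhead : kb.1 ∉ rest.map (fun kv => kv.1) := (List.nodup_cons.mp (by simpa using hnd)).1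
    have hknd' : ∀ kb' ∈ rest, kb'.2.keys.Nodup := fun kb' h => hknd kb' (List.mem_cons_of_mem _ h)
    by_cases hz : (pvFilt kb.2 T).size == 0
    · rw [if_pos hz, ih (T ++ kb.2.keys) out
        (fun kb' h => hfresh kb' (List.mem_cons_of_mem _ h)) hnd' hknd']
      congr 1
      rw [pvSpecAll, List.filter_cons]
      simp [hz]
    · rw [if_neg hz, ih (T ++ kb.2.keys) (out.insert kb.1 (pvFilt kb.2 T)) ?hf hnd' hknd']
      · rw [PySem.Dict.items_insert_of_not_contains out _ (hfresh kb List.mem_cons_self),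
          pvSpecAll, List.filter_cons]
        simp only [hz, Bool.not_false, if_pos]
        simp
      case hf =>
        intro kb' hkb'
        rw [PySem.Dict.contains_insert]
        have hne : kb'.1 ≠ kb.1 := by
          intro he
          exact hhead (he ▸ List.mem_map.mpr ⟨kb', hkb', rfl⟩)
        simp [hne, hfresh kb' (List.mem_cons_of_mem _ hkb')]

-- ===== VERDICT (by name: the statement is the Claim_ definition above) =====
theorem maximalItemSets_spec : Claim_equal_maximalItemSets := by
  intro itemsets _
  show maximalItemSets itemsets = maximalItemSets_alt itemsets
  simp only [maximalItemSets, maximalItemSets_alt]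
  set d : pvDD := PySem.Dict.ofList (itemsets.map (fun kv => (kv.1, PySem.Dict.ofList kv.2))) with hd
  set kbs : List (Int × pvBkt) := PySem.List.sorted d.items (fun kv => kv.1) true with hkbs
  have hnd : d.keys.Nodup := PySem.Dict.nodup_keys_ofList _
  have hvals : ∀ q ∈ d.items, (PySem.Dict.keys q.2).Nodup := by
    rw [hd]
    refine pv_update_pred _ _ PySem.Dict.empty (by simp [PySem.Dict.empty]) ?_
    intro q hq
    obtain ⟨kv, _, rfl⟩ := List.mem_map.mp hq
    exact PySem.Dict.nodup_keys_ofList kv.2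
  have hkbsperm : kbs.Perm d.items := PySem.List.sorted_perm d.items (fun kv => kv.1) true
  have hkbsmap_nodup : (kbs.map (fun kv => kv.1)).Nodup := by
    refine ((hkbsperm.map (fun kv => kv.1)).nodup_iff).mpr ?_
    exact hnd
  have hsetkeys : PySem.Set.ofList d.keys = d.keys := PySem.Set.ofList_eq_self_of_nodup d.keys hnd
  rw [hsetkeys]
  have hsort' : PySem.List.sorted d.keys (fun x => x) true = kbs.map (fun kv => kv.1) :=
    pv_sorted_keys d hnd
  have hcont' : ∀ k ∈ d.keys, d.contains k = true :=
    fun k hk => (PySem.Dict.contains_iff_mem_keys d k).mpr hk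
  have hfilt0 : ∀ kb ∈ kbs, d.get? kb.1 = some (pvFilt kb.2 []) := by
    intro kb hkb
    rw [pvFilt_nil]
    exact PySem.Dict.get?_of_mem_items d (hkbsperm.subset hkb) hnd
  have hknd : ∀ kb ∈ kbs, kb.2.keys.Nodup := fun kb h => hvals kb (hkbsperm.subset h)
  rw [pvLoopA_spec kbs d.keys d PySem.Dict.empty [] hnd hsort' hcont' hfilt0 hknd,
    pvSpecRun_items kbs [] PySem.Dict.empty (fun kb _ => PySem.Dict.contains_empty kb.1) hkbsmap_nodup]
  have hretkeys : (PySem.Dict.mk (PySem.Dict.empty.items ++ pvSpec kbs [])).keys.Nodup := by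
    have : (PySem.Dict.mk (PySem.Dict.empty.items ++ pvSpec kbs [])).keys
        = (pvSpec kbs []).map (fun kv => kv.1) := by
      simp [PySem.Dict.keys, PySem.Dict.empty]
    rw [this, pvSpec_map_fst]
    exact hkbsmap_nodup
  rw [pv_erase_empty _ hretkeys]
  have hB := pvLoopB kbs [] PySem.Dict.empty (fun kb _ => PySem.Dict.contains_empty kb.1)
    hkbsmap_nodup hknd
  simp only [List.map_nil] at hB
  rw [hB]
  rw [pvSpec_eq_All kbs [] [] (fun t => rfl)]
  simp [PySem.Dict.empty]
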